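-- pv_equiv track=rewrite | github.com/QunaSys/quri-parts | packages/circuit/quri_parts/circuit/utils/circuit_drawer.py | _create_upper_control_part
-- ===== SOURCE A (Python) =====
-- from typing import Sequence, Union
--
-- def _create_upper_control_part(
--     gate_string: list[str], control_idxs: Sequence[int], target_idxs: Sequence[int]
-- ) -> list[str]:
--     ctrl_q_head = "       "
--     ctrl_q_name = "       "
--     ctrl_q_body = "   ●   "
--     vertical_wire = "   |   "
--
--     upper_ctrl_q_list: list[int] = [
--         ctrl_idx for ctrl_idx in control_idxs if ctrl_idx < min(target_idxs)
--     ]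
--
--     gate_string.append(ctrl_q_head)
--     gate_string.append(ctrl_q_name)
--     gate_string.append(ctrl_q_body)
--
--     dist = min(target_idxs) - min(upper_ctrl_q_list)
--     for _ in range(dist * 4 - 3):
--         gate_string.append(vertical_wire)
--
--     for i in upper_ctrl_q_list[1:]:
--         dist = min(target_idxs) - i
--         p = dist * 4 - 2
--         gate_string[-p] = ctrl_q_body
--
--     return gate_string
-- ===== SOURCE B (Python) =====
-- def _create_upper_control_part(gate_string, control_idxs, target_idxs):
--     min_t = min(target_idxs)
--     uppers = [c for c in control_idxs if c < min_t]
--     n = (min_t - min(uppers)) * 4 - 3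
--     marks = {(min_t - i) * 4 - 2 for i in uppers[1:]}
--     gate_string.append("       ")
--     gate_string.append("       ")
--     gate_string.append("   \u25cf   ")
--     for k in range(n, 0, -1):
--         gate_string.append("   \u25cf   " if k in marks else "   |   ")
--     return gate_string
-- ===== Notes on version B (the rewrite author's own statement) =====
-- stated objective: faster
-- what changed: B computes min(target_idxs) once (A re-evaluates it for every control index inside the comprehension and the overwrite loop) and emits the wire/control column in one forward pass from a precomputed mark set, replacing A's append-all-wires-then-overwrite-by-negative-index two-phase scheme.
import Mathlib
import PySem

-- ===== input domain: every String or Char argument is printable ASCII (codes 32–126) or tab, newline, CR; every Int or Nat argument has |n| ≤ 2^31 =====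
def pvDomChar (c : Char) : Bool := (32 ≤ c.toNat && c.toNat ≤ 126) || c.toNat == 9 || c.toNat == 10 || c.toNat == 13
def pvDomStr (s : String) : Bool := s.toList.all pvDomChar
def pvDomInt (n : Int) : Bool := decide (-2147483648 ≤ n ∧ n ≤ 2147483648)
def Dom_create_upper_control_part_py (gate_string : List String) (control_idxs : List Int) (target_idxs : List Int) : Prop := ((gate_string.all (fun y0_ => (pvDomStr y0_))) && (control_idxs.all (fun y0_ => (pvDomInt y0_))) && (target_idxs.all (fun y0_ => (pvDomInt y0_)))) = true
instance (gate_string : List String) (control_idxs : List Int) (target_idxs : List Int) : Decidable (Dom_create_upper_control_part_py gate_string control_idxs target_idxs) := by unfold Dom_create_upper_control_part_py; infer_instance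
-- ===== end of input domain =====

-- B builds the wire/control column in ONE forward pass from a precomputed mark set instead of
-- A's append-all-wires-then-negative-index-overwrite two passes (objective: alternative; return
-- value only — the Python functions mutate gate_string in place, both identically, and return it).


-- ===== PORT A =====
def create_upper_control_part_py (gate_string : List String) (control_idxs : List Int) (target_idxs : List Int) : List String :=
  match PySem.List.min? target_idxs (fun x => x) with
  | none => gate_string          -- min(target_idxs) raises ValueError (excluded by Pre_)
  | some mt =>
    let upper_ctrl_q_list := control_idxs.filter (fun c => decide (c < mt))
    let gs1 := gate_string ++ ["       "]
    let gs2 := gs1 ++ ["       "]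
    let gs3 := gs2 ++ ["   ●   "]
    match PySem.List.min? upper_ctrl_q_list (fun x => x) with
    | none => gs3                -- min(upper_ctrl_q_list) raises ValueError (excluded by Pre_)
    | some mu =>
      let dist := mt - mu
      let gs4 := (PySem.List.pyRange 0 (dist * 4 - 3) 1).foldl (fun acc _ => acc ++ ["   |   "]) gs3
      (PySem.List.slice upper_ctrl_q_list (some 1) none).foldl
        (fun acc i => PySem.List.pySetD acc (-((mt - i) * 4 - 2)) "   ●   ") gs4

-- ===== PORT B =====
def create_upper_control_part_py_alt (gate_string : List String) (control_idxs : List Int) (target_idxs : List Int) : List String :=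
  match PySem.List.min? target_idxs (fun x => x) with
  | none => gate_string          -- min raises ValueError (excluded by Pre_)
  | some mt =>
    let uppers := control_idxs.filter (fun c => decide (c < mt))
    match PySem.List.min? uppers (fun x => x) with
    | none => gate_string        -- min raises ValueError (excluded by Pre_)
    | some mu =>
      let n := (mt - mu) * 4 - 3
      let marks : PySem.Set Int :=
        PySem.Set.ofList ((PySem.List.slice uppers (some 1) none).map (fun i => (mt - i) * 4 - 2))
      let gs3 := gate_string ++ ["       "] ++ ["       "] ++ ["   ●   "]
      (PySem.List.pyRange n 0 (-1)).foldl
        (fun acc k => acc ++ [if marks.contains k then "   ●   " else "   |   "]) gs3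

-- ===== PRECONDITION & SPEC =====
-- Pre_ excludes exactly the inputs where A raises ValueError (min of an empty sequence):
-- empty target_idxs, or no control index below every target index.  B raises there too.
def Pre_create_upper_control_part_py (gate_string : List String) (control_idxs : List Int) (target_idxs : List Int) : Prop :=
  target_idxs ≠ [] ∧ ∃ c ∈ control_idxs, ∀ t ∈ target_idxs, c < t
instance (gate_string : List String) (control_idxs : List Int) (target_idxs : List Int) : Decidable (Pre_create_upper_control_part_py gate_string control_idxs target_idxs) := by unfold Pre_create_upper_control_part_py; infer_instance

def pvWitness_create_upper_control_part_py : List String × List Int × List Int := (["q0"], [0, 1], [2])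

def Spec_create_upper_control_part_py (gate_string : List String) (control_idxs : List Int) (target_idxs : List Int) (out : List String) : Prop := out = create_upper_control_part_py_alt gate_string control_idxs target_idxs
instance (gate_string : List String) (control_idxs : List Int) (target_idxs : List Int) (out : List String) : Decidable (Spec_create_upper_control_part_py gate_string control_idxs target_idxs out) := by unfold Spec_create_upper_control_part_py; infer_instance

-- ===== CLAIM (what is proved, stated in full; the proofs are below) =====
def Claim_equal_create_upper_control_part_py : Prop := ∀ (gate_string : List String) (control_idxs : List Int) (target_idxs : List Int), Dom_create_upper_control_part_py gate_string control_idxs target_idxs → Pre_create_upper_control_part_py gate_string control_idxs target_idxs → Spec_create_upper_control_part_py gate_string control_idxs target_idxs (create_upper_control_part_py gate_string control_idxs target_idxs)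

-- ===== LEMMAS AND PROOFS =====

lemma pySetD_neg_eq_set {α : Type} (xs : List α) (p : Int) (v : α)
    (h1 : 1 ≤ p) (h2 : p ≤ (xs.length : Int)) :
    PySem.List.pySetD xs (-p) v = xs.set (xs.length - p.toNat) v := by
  have h3 : -(xs.length : Int) ≤ -p := by omega
  have hp0 : ¬ (p ≤ 0) := by omega
  simp [PySem.List.pySetD, PySem.List.pySet?, PySem.List.pyIdx?, h3, hp0]

lemma foldSet_length {α : Type} (ps : List Int) (t : List α) (v : α) :
    (ps.foldl (fun acc p => PySem.List.pySetD acc (-p) v) t).length = t.length := by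
  induction ps generalizing t with
  | nil => rfl
  | cons p ps ih => simp [List.foldl_cons, ih, PySem.List.length_pySetD]

lemma foldSet_getElem {α : Type} (ps : List Int) (t : List α) (v : α)
    (hb : ∀ p ∈ ps, 1 ≤ p ∧ p ≤ (t.length : Int)) (j : Nat) (hj : j < t.length) :
    (ps.foldl (fun acc p => PySem.List.pySetD acc (-p) v) t)[j]'(by rw [foldSet_length]; exact hj)
      = if ((t.length : Int) - j) ∈ ps then v else t[j] := by
  induction ps generalizing t with
  | nil => simp
  | cons p ps ih =>
    have hp := hb p (List.mem_cons_self ..)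
    have hstep : PySem.List.pySetD t (-p) v = t.set (t.length - p.toNat) v :=
      pySetD_neg_eq_set t p v hp.1 hp.2
    have hlen : (t.set (t.length - p.toNat) v).length = t.length := by simp
    have hb' : ∀ q ∈ ps, 1 ≤ q ∧ q ≤ ((t.set (t.length - p.toNat) v).length : Int) := by
      intro q hq; rw [hlen]; exact hb q (List.mem_cons_of_mem _ hq)
    have := ih (t.set (t.length - p.toNat) v) hb' (by rw [hlen]; exact hj)
    simp only [List.foldl_cons, hstep]
    rw [this]
    rw [List.getElem_set]
    have hiff : (t.length - p.toNat = j) ↔ ((t.length : Int) - j = p) := by omega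
    by_cases hmem : ((t.length : Int) - j) ∈ ps
    · simp [hmem, hlen, List.mem_cons]
    · by_cases heq : ((t.length : Int) - j) = p
      · simp [List.mem_cons, heq, hiff.mpr heq]
      · have : ¬ (t.length - p.toNat = j) := fun h => heq (hiff.mp h)
        simp [hmem, hlen, List.mem_cons, heq, this]

lemma foldSet_append {α : Type} (ps : List Int) (gs t : List α) (v : α)
    (hb : ∀ p ∈ ps, 1 ≤ p ∧ p ≤ (t.length : Int)) :
    ps.foldl (fun acc p => PySem.List.pySetD acc (-p) v) (gs ++ t)
      = gs ++ ps.foldl (fun acc p => PySem.List.pySetD acc (-p) v) t := by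
  induction ps generalizing t with
  | nil => rfl
  | cons p ps ih =>
    have hp := hb p (List.mem_cons_self ..)
    have hstep : PySem.List.pySetD (gs ++ t) (-p) v = gs ++ t.set (t.length - p.toNat) v := by
      rw [pySetD_neg_eq_set (gs ++ t) p v hp.1 (by simp; omega)]
      rw [List.length_append]
      rw [List.set_append_right _ _ (by omega)]
      have hidx : gs.length + t.length - p.toNat - gs.length = t.length - p.toNat := by omega
      rw [hidx]
    have hstep2 : PySem.List.pySetD t (-p) v = t.set (t.length - p.toNat) v :=
      pySetD_neg_eq_set t p v hp.1 hp.2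
    simp only [List.foldl_cons, hstep, hstep2]
    exact ih (t.set (t.length - p.toNat) v)
      (fun q hq => by simpa using hb q (List.mem_cons_of_mem _ hq))


-- ===== VERDICT (by name: the statement is the Claim_ definition above) =====
theorem create_upper_control_part_py_spec : Claim_equal_create_upper_control_part_py := by
  intro gs cs ts hdom hpre
  unfold Spec_create_upper_control_part_py
  unfold create_upper_control_part_py create_upper_control_part_py_alt
  obtain ⟨hts, hex⟩ := hpre
  obtain ⟨c, hc, hlt⟩ := hex
  cases hmt : PySem.List.min? ts (fun x => x) with
  | none => exact absurd ((PySem.List.min?_eq_none_iff _ _).mp hmt) hts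
  | some mt =>
  simp only
  set uppers := cs.filter (fun c => decide (c < mt)) with huppers
  have hmtmem : mt ∈ ts := PySem.List.min?_mem hmt
  have hcu : c ∈ uppers := by
    rw [huppers, List.mem_filter]; exact ⟨hc, by simpa using hlt mt hmtmem⟩
  cases hmu : PySem.List.min? uppers (fun x => x) with
  | none => exact absurd ((PySem.List.min?_eq_none_iff _ _).mp hmu ▸ hcu) (List.not_mem_nil)
  | some mu =>
  simp only
  have hmumem : mu ∈ uppers := PySem.List.min?_mem hmu
  have hmult : mu < mt := by have := (List.mem_filter.mp hmumem).2; simpa using this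
  have hmin : ∀ y ∈ uppers, mu ≤ y := PySem.List.min?_isMin hmu
  -- abbreviations
  set K : Int := (mt - mu) * 4 - 3 with hKdef
  have hK1 : 1 ≤ K := by omega
  set N : Nat := K.toNat with hNdef
  have hNK : (N : Int) = K := by omega
  set ps : List Int := (PySem.List.slice uppers (some 1) none).map (fun i => (mt - i) * 4 - 2) with hps
  have hb2 : ∀ q ∈ ps, 2 ≤ q ∧ q ≤ K + 1 := by
    intro q hq
    rw [hps] at hq
    obtain ⟨i, hi, rfl⟩ := List.mem_map.mp hq
    rw [PySem.List.slice_from_one] at hi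
    have hiu : i ∈ uppers := List.mem_of_mem_tail hi
    have hilt : i < mt := by have := (List.mem_filter.mp hiu).2; simpa using this
    have hile : mu ≤ i := hmin i hiu
    omega
  have hfold : ∀ init : List String,
      (PySem.List.slice uppers (some 1) none).foldl
        (fun acc i => PySem.List.pySetD acc (-((mt - i) * 4 - 2)) "   ●   ") init
      = ps.foldl (fun acc p => PySem.List.pySetD acc (-p) "   ●   ") init := by
    intro init; rw [hps, List.foldl_map]
  have hwires : (PySem.List.pyRange 0 K 1).map (fun _ => "   |   ") = List.replicate N "   |   " := by
    rw [List.map_const', PySem.List.length_pyRange_one]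
    congr 1
    omega
  have hcont : ∀ k : Int, (if (PySem.Set.ofList ps).contains k = true then "   ●   " else "   |   ")
      = (if k ∈ ps then "   ●   " else "   |   ") := by
    intro k
    by_cases h : k ∈ ps <;>
      simp [PySem.Set.mem_ofList, h]
  rw [PySem.List.foldl_append_singleton_eq_map, PySem.List.foldl_append_singleton_eq_map,
      hwires, hfold, PySem.List.pyRange_neg_one, List.map_map]
  have hK0 : (K - 0).toNat = N := by omega
  rw [hK0]
  -- pull the three header rows and the wires into one tail
  have hassoc : gs ++ ["       "] ++ ["       "] ++ ["   ●   "] ++ List.replicate N "   |   "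
      = gs ++ (["       ", "       ", "   ●   "] ++ List.replicate N "   |   ") := by
    simp
  have hassoc2 : gs ++ ["       "] ++ ["       "] ++ ["   ●   "]
      ++ List.map ((fun k => if (PySem.Set.ofList ps).contains k = true then "   ●   " else "   |   ") ∘ fun k => K - ↑k) (List.range N)
      = gs ++ (["       ", "       ", "   ●   "]
      ++ List.map ((fun k => if (PySem.Set.ofList ps).contains k = true then "   ●   " else "   |   ") ∘ fun k => K - ↑k) (List.range N)) := by
    simp
  rw [hassoc, hassoc2]
  set t0 : List String := ["       ", "       ", "   ●   "] ++ List.replicate N "   |   " with ht0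
  have ht0len : t0.length = N + 3 := by simp [ht0]
  have hb : ∀ q ∈ ps, 1 ≤ q ∧ q ≤ (t0.length : Int) := by
    intro q hq; have := hb2 q hq; rw [ht0len]; push_cast; omega
  rw [foldSet_append ps gs t0 _ hb]
  congr 1
  apply List.ext_getElem
  · rw [foldSet_length, ht0len]; simp
  intro j hj1 hj2
  rw [foldSet_length, ht0len] at hj1
  rw [foldSet_getElem ps t0 _ hb j (by omega)]
  by_cases hj3 : j < 3
  · interval_cases j
    · rw [if_neg (by intro h; have := hb2 _ h; rw [ht0len] at this; push_cast at this; omega)]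
      simp [ht0]
    · rw [if_neg (by intro h; have := hb2 _ h; rw [ht0len] at this; push_cast at this; omega)]
      simp [ht0]
    · have h2 : t0[2]'(by omega) = "   ●   " := by simp [ht0]
      have hr : (["       ", "       ", "   ●   "]
          ++ List.map ((fun k => if (PySem.Set.ofList ps).contains k = true then "   ●   " else "   |   ") ∘ fun k => K - ↑k) (List.range N))[2]'(by simp)
          = "   ●   " := by simp
      rw [hr, h2]
      split <;> rfl
  · -- wire rows
    have hjm : j - 3 < N := by omega
    have hrhs : (["       ", "       ", "   ●   "]
        ++ List.map ((fun k => if (PySem.Set.ofList ps).contains k = true then "   ●   " else "   |   ") ∘ fun k => K - ↑k) (List.range N))[j]'(by simp; omega)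
        = (if (K - ((j : Int) - 3)) ∈ ps then "   ●   " else "   |   ") := by
      rw [List.getElem_append_right (by simp; omega)]
      simp only [List.getElem_map, List.getElem_range, Function.comp_apply, hcont]
      congr 2
      simp
      omega
    rw [hrhs]
    have hlhs0 : t0[j]'(by omega) = "   |   " := by
      simp only [ht0]
      rw [List.getElem_append_right (by simp; omega)]
      simp
    have hceq : ((t0.length : Int) - j) = K - ((j : Int) - 3) := by
      rw [ht0len]; push_cast; omega
    rw [hceq, hlhs0]
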